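-- pv_equiv track=rewrite | github.com/saptarsi96/Codes | googlehb.py | boring
-- ===== SOURCE A (Python) =====
-- def boring(num):
--     num = [int(x) for x in str(num)]
--     flag = True
--     for i in range(0,len(num),2):
--         if num[i]%2 != 1:
--             flag = False
--     for i in range(1,len(num),2):
--         if num[i]%2 != 0:
--             flag = False
--     return flag
-- ===== SOURCE B (Python) =====
-- def boring(num):
--     # Pure arithmetic from the least significant digit: consecutive digits must
--     # alternate in parity, and the most significant digit must be odd.
--     d = num % 10
--     num //= 10
--     while num > 0:
--         e = num % 10
--         if e % 2 == d % 2: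
--             return False
--         d = e
--         num //= 10
--     return d % 2 == 1
-- ===== Notes on version B (the rewrite author's own statement) =====
-- stated objective: alternative
-- what changed: Instead of converting num to a string and checking each digit's parity against its position index in two strided loops, B never builds the digit string: it peels decimal digits arithmetically (modulus and floor division) from the least significant end, requiring consecutive digits to alternate in parity and the final (most significant) digit to be odd, which is equivalent to the positional parity pattern.
import Mathlib
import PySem

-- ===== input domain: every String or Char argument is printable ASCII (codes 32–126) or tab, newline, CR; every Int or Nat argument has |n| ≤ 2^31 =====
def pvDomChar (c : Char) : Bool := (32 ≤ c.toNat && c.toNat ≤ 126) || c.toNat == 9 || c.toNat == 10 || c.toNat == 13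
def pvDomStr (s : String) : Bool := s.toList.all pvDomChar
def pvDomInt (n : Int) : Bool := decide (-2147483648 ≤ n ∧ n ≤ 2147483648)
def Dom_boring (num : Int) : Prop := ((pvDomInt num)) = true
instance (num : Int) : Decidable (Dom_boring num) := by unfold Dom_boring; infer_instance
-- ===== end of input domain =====

-- B drops the digit-string entirely: it peels digits arithmetically from the least
-- significant end, requiring consecutive digits to alternate in parity and the most
-- significant digit to be odd; equivalence is proved for all non-negative num
-- (Python A raises ValueError at int('-') on negatives).

-- ===== PORT A =====
-- int(x) on a one-character string of a digit is ported as (c.toNat : Int) - 48;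
-- exact on Pre_ (num ≥ 0 makes every character of str(num) a digit).
def boring (num : Int) : Bool :=
  let ds := (PySem.Int.toStr num).toList.map (fun c => ((c.toNat : Int) - 48))
  let flag := true
  let flag := (PySem.List.pyRange 0 (ds.length : Int) 2).foldl
      (fun fl i => if PySem.Int.mod (PySem.List.pyGetD ds i 0) 2 ≠ 1 then false else fl) flag
  let flag := (PySem.List.pyRange 1 (ds.length : Int) 2).foldl
      (fun fl i => if PySem.Int.mod (PySem.List.pyGetD ds i 0) 2 ≠ 0 then false else fl) flag
  flag

-- ===== PORT B =====
-- Source B's while-loop: d holds the previous (lower) digit, num the digits still unread.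
def boringLoop (num d : Int) : Bool :=
  if 0 < num then
    let e := PySem.Int.mod num 10
    if PySem.Int.mod e 2 == PySem.Int.mod d 2 then false
    else boringLoop (PySem.Int.floordiv num 10) e
  else PySem.Int.mod d 2 == 1
termination_by num.toNat
decreasing_by
  rw [PySem.Int.floordiv_eq_ediv_of_pos (by norm_num)]
  omega

def boring_alt (num : Int) : Bool :=
  boringLoop (PySem.Int.floordiv num 10) (PySem.Int.mod num 10)

-- ===== PRECONDITION & SPEC =====
-- Pre_ excludes negative num, on which Python A raises ValueError at int('-').
def Pre_boring (num : Int) : Prop := 0 ≤ num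
instance (num : Int) : Decidable (Pre_boring num) := by unfold Pre_boring; infer_instance
def pvWitness_boring : Int := (13)
def Spec_boring (num : Int) (out : Bool) : Prop := out = boring_alt num
instance (num : Int) (out : Bool) : Decidable (Spec_boring num out) := by unfold Spec_boring; infer_instance

-- ===== CLAIM (what is proved, stated in full; the proofs are below) =====
def Claim_equal_boring : Prop := ∀ (num : Int), Dom_boring num → Pre_boring num → Spec_boring num (boring num)

-- ===== LEMMAS AND PROOFS =====

-- The decimal digit characters of m, most significant first (= Nat.toDigits 10 m).
def dchars (m : Nat) : List Char :=
  if m < 10 then [Nat.digitChar m]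
  else dchars (m / 10) ++ [Nat.digitChar (m % 10)]
termination_by m
decreasing_by exact Nat.div_lt_self (by omega) (by norm_num)

-- the positional-parity property A checks: digit at index k and k have opposite parity
def QP (cs : List Char) : Prop := ∀ k, (h : k < cs.length) → (cs[k].toNat + k) % 2 = 1

lemma dchar_val (d : Nat) (h : d < 10) : (Nat.digitChar d).toNat = 48 + d := by
  interval_cases d <;> rfl

lemma toDigitsCore_eq_dchars : ∀ (n f : Nat), 0 < f → n < 10 ^ f → ∀ (l : List Char),
    Nat.toDigitsCore 10 f n l = dchars n ++ l := by
  intro n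
  induction n using Nat.strong_induction_on with
  | _ n ih =>
    intro f hfpos hf l
    match f with
    | 0 => omega
    | f + 1 =>
      rw [Nat.toDigitsCore]
      by_cases h10 : n < 10
      · rw [if_pos (by omega : n / 10 = 0), dchars, if_pos h10, Nat.mod_eq_of_lt h10]
        simp
      · rw [if_neg (by omega : ¬ n / 10 = 0)]
        have hf' : 0 < f := by
          rcases Nat.eq_zero_or_pos f with hfz | hfp
          · subst hfz
            norm_num at hf
            omega
          · exact hfp
        have hlt : n / 10 < 10 ^ f := by
          rw [Nat.div_lt_iff_lt_mul (by norm_num)]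
          calc n < 10 ^ (f + 1) := hf
            _ = 10 ^ f * 10 := by ring
        rw [ih (n / 10) (Nat.div_lt_self (by omega) (by norm_num)) f hf' hlt]
        conv_rhs => rw [dchars]
        rw [if_neg h10]
        simp

lemma toChars_eq (m : Nat) : PySem.Int.toChars (m : Int) = dchars m := by
  unfold PySem.Int.toChars
  rw [if_neg (by omega : ¬ (m : Int) < 0)]
  have h1 : (m : Int).toNat = m := Int.toNat_natCast m
  rw [h1]
  unfold Nat.toDigits
  rw [toDigitsCore_eq_dchars m (m + 1) (by omega)
    (lt_of_lt_of_le (Nat.lt_pow_self (by norm_num)) (Nat.pow_le_pow_right (by norm_num) (by omega)))]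
  simp

-- A's loop body 'if bad then flag = False' as a fold: result = init && all not-bad.
lemma flag_foldl {α : Type} (p : α → Prop) [DecidablePred p] (L : List α) (init : Bool) :
    L.foldl (fun fl i => if p i then false else fl) init
      = (init && L.all (fun i => decide ¬ p i)) := by
  induction L generalizing init with
  | nil => simp
  | cons x xs ih =>
    rw [List.foldl_cons, ih, List.all_cons]
    by_cases hp : p x <;> simp [hp]

-- A's two strided flag loops over cs' digit values ⟺ QP cs
lemma A_iff (cs : List Char) :
    (let ds := cs.map (fun c => ((c.toNat : Int) - 48));
     (PySem.List.pyRange 1 (ds.length : Int) 2).foldl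
       (fun fl i => if PySem.Int.mod (PySem.List.pyGetD ds i 0) 2 ≠ 0 then false else fl)
       ((PySem.List.pyRange 0 (ds.length : Int) 2).foldl
         (fun fl i => if PySem.Int.mod (PySem.List.pyGetD ds i 0) 2 ≠ 1 then false else fl) true))
      = true ↔ QP cs := by
  simp only []
  rw [flag_foldl, flag_foldl]
  simp only [Bool.true_and, Bool.and_eq_true, List.all_eq_true,
    PySem.List.mem_pyRange_iff_of_pos (by norm_num : (0:Int) < 2),
    List.length_map, decide_eq_true_eq, not_not]
  constructor
  · rintro ⟨h0, h1⟩ k hk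
    have hget : PySem.List.pyGetD (cs.map (fun c => ((c.toNat : Int) - 48))) (k : Int) 0
        = ((cs[k].toNat : Int) - 48) := by
      rw [PySem.List.pyGetD_eq_getElem _ 0 (by positivity) (by simp; omega)]
      simp
    rcases Nat.even_or_odd k with he | ho
    · obtain ⟨t, ht⟩ := he
      have := h0 (k : Int) ⟨by positivity, by exact_mod_cast hk, ⟨(t : Int), by push_cast [ht]; ring⟩⟩
      rw [hget, PySem.Int.mod_eq_emod_of_pos (by norm_num)] at this
      omega
    · obtain ⟨t, ht⟩ := ho
      have := h1 (k : Int) ⟨by omega, by exact_mod_cast hk, ⟨(t : Int), by push_cast [ht]; ring⟩⟩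
      rw [hget, PySem.Int.mod_eq_emod_of_pos (by norm_num)] at this
      omega
  · intro h
    constructor
    · rintro i ⟨hi0, hin, hdvd⟩
      have hk : i.toNat < cs.length := by omega
      have hq := h i.toNat hk
      rw [PySem.List.pyGetD_eq_getElem _ 0 hi0 (by simp; omega)]
      simp only [List.getElem_map]
      rw [PySem.Int.mod_eq_emod_of_pos (by norm_num)]
      obtain ⟨t, ht⟩ := hdvd
      omega
    · rintro i ⟨hi1, hin, hdvd⟩
      have hk : i.toNat < cs.length := by omega
      have hq := h i.toNat hk
      rw [PySem.List.pyGetD_eq_getElem _ 0 (by omega) (by simp; omega)]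
      simp only [List.getElem_map]
      rw [PySem.Int.mod_eq_emod_of_pos (by norm_num)]
      obtain ⟨t, ht⟩ := hdvd
      omega

lemma QP_append (xs : List Char) (c : Char) :
    QP (xs ++ [c]) ↔ QP xs ∧ (c.toNat + xs.length) % 2 = 1 := by
  constructor
  · intro h
    refine ⟨fun k hk => ?_, ?_⟩
    · have := h k (by simp; omega)
      rwa [List.getElem_append_left hk] at this
    · have := h xs.length (by simp)
      rwa [List.getElem_concat_length rfl] at this
  · rintro ⟨h1, h2⟩ k hk
    simp only [List.length_append, List.length_cons, List.length_nil] at hk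
    by_cases hlt : k < xs.length
    · rw [List.getElem_append_left hlt]
      exact h1 k hlt
    · have hke : k = xs.length := by omega
      subst hke
      rwa [List.getElem_concat_length rfl]

-- under QP, the last digit of m fixes the length parity of dchars m
lemma QP_last (m : Nat) (h : QP (dchars m)) : (m % 10 + (dchars m).length) % 2 = 0 := by
  by_cases h10 : m < 10
  · rw [dchars, if_pos h10] at h ⊢
    have := h 0 (by simp)
    simp only [List.getElem_cons_zero, dchar_val m h10] at this
    simp only [List.length_cons, List.length_nil]
    omega
  · rw [dchars, if_neg h10] at h ⊢
    have hL := h (dchars (m / 10)).length (by simp)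
    rw [List.getElem_concat_length rfl, dchar_val (m % 10) (Nat.mod_lt _ (by norm_num))] at hL
    simp only [List.length_append, List.length_cons, List.length_nil]
    omega

-- B's value on a natural number ⟺ QP of its digit characters
lemma alt_iff : ∀ m : Nat, (boring_alt (m : Int) = true ↔ QP (dchars m)) := by
  intro m
  induction m using Nat.strong_induction_on with
  | _ m ih =>
    unfold boring_alt
    rw [show ((10:Int)) = ((10:Nat):Int) from rfl, PySem.Int.floordiv_natCast,
      PySem.Int.mod_natCast]
    by_cases h10 : m < 10
    · have hq : m / 10 = 0 := Nat.div_eq_of_lt h10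
      rw [hq, boringLoop, if_neg (by norm_num : ¬ (0:Int) < ((0:Nat):Int))]
      rw [show ((2:Int)) = ((2:Nat):Int) from rfl, PySem.Int.mod_natCast]
      rw [dchars, if_pos h10, beq_iff_eq]
      constructor
      · intro hb k hk
        simp only [List.length_cons, List.length_nil] at hk
        have hk0 : k = 0 := by omega
        subst hk0
        rw [List.getElem_cons_zero, dchar_val m h10]
        have hm : m % 10 % 2 = 1 := by exact_mod_cast hb
        omega
      · intro hq2
        have h0 := hq2 0 (by simp)
        rw [List.getElem_cons_zero, dchar_val m h10] at h0
        exact_mod_cast congrArg (fun n : Nat => (n : Int)) (show m % 10 % 2 = 1 by omega)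
    · have hqpos : 0 < m / 10 := Nat.div_pos (by omega) (by norm_num)
      rw [boringLoop, if_pos (by exact_mod_cast hqpos : (0:Int) < ((m / 10 : Nat) : Int))]
      simp only []
      rw [show ((10:Int)) = ((10:Nat):Int) from rfl, PySem.Int.mod_natCast,
        PySem.Int.floordiv_natCast,
        show ((2:Int)) = ((2:Nat):Int) from rfl, PySem.Int.mod_natCast, PySem.Int.mod_natCast]
      have hrec : boringLoop (((m / 10 / 10 : Nat)) : Int) (((m / 10 % 10 : Nat)) : Int)
          = boring_alt ((m / 10 : Nat) : Int) := by
        unfold boring_alt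
        rw [show ((10:Int)) = ((10:Nat):Int) from rfl, PySem.Int.floordiv_natCast,
          PySem.Int.mod_natCast]
      rw [hrec]
      have hIH := ih (m / 10) (Nat.div_lt_self (by omega) (by norm_num))
      rw [dchars, if_neg h10, QP_append, dchar_val (m % 10) (Nat.mod_lt _ (by norm_num))]
      by_cases hQ : QP (dchars (m / 10))
      · have hB : boring_alt ((m / 10 : Nat) : Int) = true := hIH.mpr hQ
        have hlast := QP_last (m / 10) hQ
        by_cases hC : m / 10 % 10 % 2 = m % 10 % 2
        · rw [if_pos (by simp only [beq_iff_eq, Nat.cast_inj]; exact hC)]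
          simp only [Bool.false_eq_true, false_iff, not_and]
          intro _ h2
          omega
        · rw [if_neg (by simp only [beq_iff_eq, Nat.cast_inj]; exact hC), hB]
          constructor
          · intro _
            exact ⟨hQ, by omega⟩
          · intro _
            rfl
      · have hB : boring_alt ((m / 10 : Nat) : Int) = false := by
          cases hb : boring_alt ((m / 10 : Nat) : Int)
          · rfl
          · exact absurd (hIH.mp hb) hQ
        rw [hB]
        split_ifs <;> simp [hQ]

-- ===== VERDICT (by name: the statement is the Claim_ definition above) =====
theorem boring_spec : Claim_equal_boring := by
  intro num _ hpre
  unfold Spec_boring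
  obtain ⟨m, rfl⟩ : ∃ m : Nat, num = (m : Int) := ⟨num.toNat, (Int.toNat_of_nonneg hpre).symm⟩
  rw [Bool.eq_iff_iff]
  have hA : boring ((m : Nat) : Int) = true ↔ QP (dchars m) := by
    unfold boring
    rw [PySem.Int.toList_toStr, toChars_eq]
    exact A_iff (dchars m)
  rw [hA, alt_iff m]
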